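-- pv_equiv track=rewrite | github.com/PabloRMira/sql_formatter | sql_formatter/utils.py | extract_outer_subquery
-- ===== SOURCE A (Python) =====
-- def extract_outer_subquery(s):
--     "Extract outer subquery in query `s`"
--     # initialize container for subquery positions
--     # in string `s`
--     subquery_pos = []
--     # auxiliar indicator to get the subquery right
--     ind = True
--     # counter for parenthesis
--     k = 0
--     # loop over string characters
--     for i, c in enumerate(s):
--         if s[i:(i+8)] == "(\nSELECT" and ind: # query start
--             subquery_pos.append(i)
--             k = 0  # set the parenthesis counter to 0
--             # turn off the indicator for the program to know
--             # that we already hit the subquery start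
--             ind = False
--         elif c == "(": # if there is a parenthesis not involving a subquery
--             k += 1
--         elif c == ")" and k == 0 and not ind: # end position for subquery
--             subquery_pos.append(i)
--             return subquery_pos
--         elif c == ")":
--             k -= 1
-- ===== SOURCE B (Python) =====
-- def extract_outer_subquery(s):
--     "Extract outer subquery in query `s`"
--     start = s.find("(\nSELECT")
--     if start == -1:
--         return None
--     # match EVERY parenthesis pair in the string in one stack pass,
--     # building a table open-position -> close-position, then look up
--     # the closer paired with the marker's '('
--     match = {}
--     stack = []
--     for i, c in enumerate(s):
--         if c == "(":
--             stack.append(i)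
--         elif c == ")" and stack:
--             match[stack.pop()] = i
--     end = match.get(start)
--     if end is None:
--         return None
--     return [start, end]
-- ===== Notes on version B (the rewrite author's own statement) =====
-- stated objective: alternative
-- what changed: Replaces A's single stateful scan (phase flag, 8-char slice test at every index, pre/post-marker depth counter with early return) by a staged algorithm: str.find locates the marker, one stack pass pairs ALL parentheses of the string into an open-to-close dictionary, and the answer is a dictionary lookup of the marker position.
import Mathlib
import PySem

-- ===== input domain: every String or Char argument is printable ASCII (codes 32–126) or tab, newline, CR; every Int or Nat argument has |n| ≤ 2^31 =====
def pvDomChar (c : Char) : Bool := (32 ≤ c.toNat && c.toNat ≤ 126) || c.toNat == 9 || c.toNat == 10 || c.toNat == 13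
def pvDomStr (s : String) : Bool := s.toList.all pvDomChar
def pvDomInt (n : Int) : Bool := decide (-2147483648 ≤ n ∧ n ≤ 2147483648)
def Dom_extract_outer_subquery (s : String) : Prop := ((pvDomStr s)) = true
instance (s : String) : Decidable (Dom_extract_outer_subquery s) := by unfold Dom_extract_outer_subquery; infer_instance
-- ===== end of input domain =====

-- B replaces A's one stateful scan by str.find for the marker, a stack pass pairing
-- ALL parentheses into an open→close dictionary, and one dictionary lookup; objective: alternative.

-- ===== PORT A =====
-- literal transliteration of A's for-loop over enumerate(s): walk the remaining suffix with the
-- running index i; s[i:(i+8)] is exactly `take 8` of the current suffix; state (pos, ind, k)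
def pvALoop : List Char → Nat → List Int → Bool → Int → Option (List Int)
  | [], _, _, _, _ => none
  | c :: rs, i, pos, ind, k =>
    if (c :: rs).take 8 = "(\nSELECT".toList ∧ ind = true then
      pvALoop rs (i+1) (pos ++ [(i : Int)]) false 0
    else if c = '(' then
      pvALoop rs (i+1) pos ind (k+1)
    else if c = ')' ∧ k = 0 ∧ ind = false then
      some (pos ++ [(i : Int)])
    else if c = ')' then
      pvALoop rs (i+1) pos ind (k-1)
    else
      pvALoop rs (i+1) pos ind k

def extract_outer_subquery (s : String) : Option (List Int) :=
  pvALoop s.toList 0 [] true 0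

-- ===== PORT B =====
-- Source B's stack pass over enumerate(s): push '(' positions, on ')' pop and record the pair
-- (stack top at the list head = Python's stack[-1]/pop())
def pvMatchLoop : List Char → Nat → List Int → PySem.Dict Int Int → PySem.Dict Int Int
  | [], _, _, m => m
  | c :: rs, i, stack, m =>
    if c = '(' then pvMatchLoop rs (i+1) ((i : Int) :: stack) m
    else if c = ')' ∧ stack ≠ [] then
      pvMatchLoop rs (i+1) stack.tail (m.insert (stack.headD 0) (i : Int))
    else pvMatchLoop rs (i+1) stack m

def extract_outer_subquery_alt (s : String) : Option (List Int) :=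
  let start := PySem.Str.find s "(\nSELECT"
  if start = -1 then none
  else
    let m := pvMatchLoop s.toList 0 [] PySem.Dict.empty
    match PySem.Dict.get? m start with
    | none => none
    | some e => some [start, e]

-- ===== PRECONDITION & SPEC =====
def Spec_extract_outer_subquery (s : String) (out : Option (List Int)) : Prop := out = extract_outer_subquery_alt s
instance (s : String) (out : Option (List Int)) : Decidable (Spec_extract_outer_subquery s out) := by unfold Spec_extract_outer_subquery; infer_instance

-- ===== CLAIM (what is proved, stated in full; the proofs are below) =====
def Claim_equal_extract_outer_subquery : Prop := ∀ (s : String), Dom_extract_outer_subquery s → Spec_extract_outer_subquery s (extract_outer_subquery s)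

-- ===== LEMMAS AND PROOFS =====

-- proof-side helper: the first ')' at relative depth d on the remaining suffix
def pvClose : List Char → Nat → Nat → Option Nat
  | [], _, _ => none
  | c :: rs, i, d =>
    if c = '(' then pvClose rs (i+1) (d+1)
    else if c = ')' then (if d = 0 then some i else pvClose rs (i+1) (d-1))
    else pvClose rs (i+1) d

-- proof-side helper: the plain depth loop both ports reduce to
def pvDLoop : List Char → Int → Nat → Int → Option (List Int)
  | [], _, _, _ => none
  | c :: rs, start, i, depth =>
    if c = '(' then pvDLoop rs start (i+1) (depth+1)
    else if c = ')' then
      (if depth = 0 then some [start, (i : Int)] else pvDLoop rs start (i+1) (depth-1))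
    else pvDLoop rs start (i+1) depth

-- the marker slice test is a prefix test
theorem pvMarker_iff (l : List Char) :
    l.take 8 = "(\nSELECT".toList ↔ "(\nSELECT".toList <+: l := by
  rw [List.prefix_iff_eq_take]
  constructor <;> intro h <;> simpa using h.symm

-- phase 2: once the marker is consumed, A's remaining loop IS the depth loop
theorem pvPhase2 (f : Int) :
    ∀ (rest : List Char) (i : Nat) (k : Int), pvALoop rest i [f] false k = pvDLoop rest f i k := by
  intro rest
  induction rest with
  | nil => intro i k; rfl
  | cons c rs ih =>
    intro i k
    simp only [pvALoop, pvDLoop]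
    rw [if_neg (by simp)]
    by_cases hp : c = '('
    · simp [hp, ih]
    · by_cases hc : c = ')'
      · by_cases hk : k = 0
        · simp [hc, hk]
        · simp [hc, hk, ih]
      · simp [hp, hc, ih]

-- phase 1: up to the first marker occurrence, A only updates k, then hands over to the depth loop
theorem pvPhase1 (f : Nat) :
    ∀ (rest : List Char) (i : Nat) (k : Int), i ≤ f →
      "(\nSELECT".toList <+: rest.drop (f - i) →
      (∀ j < f - i, ¬ "(\nSELECT".toList <+: rest.drop j) →
      pvALoop rest i [] true k = pvDLoop (rest.drop (f - i + 1)) (f : Int) (f + 1) 0 := by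
  intro rest
  induction rest with
  | nil =>
    intro i k _ hpre _
    have h1 := hpre.length_le
    simp at h1
  | cons c rs ih =>
    intro i k hle hpre hmin
    by_cases heq : i = f
    · subst heq
      have h0 : i - i = 0 := by omega
      rw [h0] at hpre
      simp only [List.drop_zero] at hpre
      simp only [pvALoop]
      have hcond : (c :: rs).take 8 = "(\nSELECT".toList ∧ True :=
        ⟨(pvMarker_iff _).2 hpre, trivial⟩
      rw [if_pos hcond, h0]
      simpa using pvPhase2 (i : Int) rs (i+1) 0
    · have hi : i < f := by omega
      have hfi1 : f - i = (f - (i+1)) + 1 := by omega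
      have hdropPre : (c :: rs).drop (f - i) = rs.drop (f - (i+1)) := by
        rw [hfi1]; rfl
      have hpre' : "(\nSELECT".toList <+: rs.drop (f - (i+1)) := by
        rw [← hdropPre]; exact hpre
      have hmin' : ∀ j < f - (i+1), ¬ "(\nSELECT".toList <+: rs.drop j := by
        intro j hj
        have := hmin (j+1) (by omega)
        simpa using this
      have hgoalDrop : (c :: rs).drop (f - i + 1) = rs.drop (f - (i+1) + 1) := by
        rw [show f - i + 1 = (f - (i+1) + 1) + 1 from by omega]; rfl
      simp only [pvALoop]
      rw [if_neg (by
        rintro ⟨h1, -⟩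
        exact hmin 0 (by omega) (by simpa using (pvMarker_iff _).1 h1))]
      rw [hgoalDrop]
      by_cases hp : c = '('
      · rw [if_pos hp]
        exact ih (i+1) (k+1) (by omega) hpre' hmin'
      · by_cases hc : c = ')'
        · rw [if_neg hp, if_neg (by simp), if_pos hc]
          exact ih (i+1) (k-1) (by omega) hpre' hmin'
        · rw [if_neg hp, if_neg (by simp [hc]), if_neg hc]
          exact ih (i+1) k (by omega) hpre' hmin'

-- no marker anywhere: A's loop never flips ind and never returns a value
theorem pvNoMarker :
    ∀ (rest : List Char), (∀ j, ¬ "(\nSELECT".toList <+: rest.drop j) →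
      ∀ (i : Nat) (k : Int), pvALoop rest i [] true k = none := by
  intro rest
  induction rest with
  | nil => intro _ i k; rfl
  | cons c rs ih =>
    intro h i k
    have h' : ∀ j, ¬ "(\nSELECT".toList <+: rs.drop j := fun j => by
      simpa using h (j+1)
    simp only [pvALoop]
    rw [if_neg (by
      rintro ⟨h1, -⟩
      exact h 0 (by simpa using (pvMarker_iff _).1 h1))]
    by_cases hp : c = '('
    · rw [if_pos hp]; exact ih h' (i+1) (k+1)
    · by_cases hc : c = ')'
      · rw [if_neg hp, if_neg (by simp), if_pos hc]
        exact ih h' (i+1) (k-1)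
      · rw [if_neg hp, if_neg (by simp [hc]), if_neg hc]
        exact ih h' (i+1) k

-- the depth loop computes pvClose, tagged with the start position
theorem pvDLoop_eq_close (f : Int) :
    ∀ (rest : List Char) (i d : Nat),
      pvDLoop rest f i ((d : Nat) : Int) = (pvClose rest i d).map (fun j => [f, (j : Int)]) := by
  intro rest
  induction rest with
  | nil => intro i d; rfl
  | cons c rs ih =>
    intro i d
    simp only [pvDLoop, pvClose]
    by_cases hp : c = '('
    · rw [if_pos hp, if_pos hp]
      have := ih (i+1) (d+1)
      simpa using this
    · rw [if_neg hp, if_neg hp]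
      by_cases hc : c = ')'
      · rw [if_pos hc, if_pos hc]
        by_cases hd : d = 0
        · subst hd; simp
        · rw [if_neg (by omega), if_neg hd]
          have hcast : ((d : Int) - 1) = (((d - 1 : Nat) : Nat) : Int) := by omega
          rw [hcast]
          exact ih (i+1) (d-1)
      · rw [if_neg hc, if_neg hc]
        exact ih (i+1) d

-- once f's entry is settled (or f is not on the stack), the rest of the scan never touches key f
theorem pvNoTouch (f : Nat) :
    ∀ (rest : List Char) (i : Nat) (stack : List Int) (m : PySem.Dict Int Int),
      (f : Int) ∉ stack → f < i →
      PySem.Dict.get? (pvMatchLoop rest i stack m) (f : Int) = PySem.Dict.get? m (f : Int) := by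
  intro rest
  induction rest with
  | nil => intro i stack m _ _; rfl
  | cons c rs ih =>
    intro i stack m hmem hfi
    simp only [pvMatchLoop]
    by_cases hp : c = '('
    · rw [if_pos hp]
      have hni : (f : Int) ∉ ((i : Int) :: stack) := by
        intro hx
        rcases List.mem_cons.1 hx with h1 | h1
        · omega
        · exact hmem h1
      exact ih (i+1) _ m hni (by omega)
    · rw [if_neg hp]
      cases stack with
      | nil =>
        rw [if_neg (by simp)]
        exact ih (i+1) [] m (by simp) (by omega)
      | cons t rest' =>
        by_cases hc : c = ')'
        · rw [if_pos ⟨hc, by simp⟩]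
          simp only [List.tail_cons, List.headD_cons]
          have hne : (f : Int) ≠ t := fun he => hmem (he ▸ List.mem_cons_self ..)
          rw [ih (i+1) rest' _ (fun hx => hmem (List.mem_cons_of_mem _ hx)) (by omega)]
          simp [PySem.Dict.get?_insert, hne]
        · rw [if_neg (fun hx => hc hx.1)]
          exact ih (i+1) (t :: rest') m hmem (by omega)

-- main stack invariant: with f buried under `ab` opens, the final table's entry for f
-- is exactly the first ')' at relative depth ab.length
theorem pvStackInv (f : Nat) :
    ∀ (rest : List Char) (i : Nat) (ab bb : List Int) (m : PySem.Dict Int Int),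
      f < i → (f : Int) ∉ ab → (f : Int) ∉ bb →
      PySem.Dict.get? m (f : Int) = none →
      PySem.Dict.get? (pvMatchLoop rest i (ab ++ (f : Int) :: bb) m) (f : Int)
        = (pvClose rest i ab.length).map (fun j => (j : Int)) := by
  intro rest
  induction rest with
  | nil =>
    intro i ab bb m _ _ _ hm
    simpa using hm
  | cons c rs ih =>
    intro i ab bb m hfi hab hbb hm
    simp only [pvMatchLoop, pvClose]
    by_cases hp : c = '('
    · simp only [if_pos hp]
      have hab' : (f : Int) ∉ ((i : Int) :: ab) := by
        intro hx
        rcases List.mem_cons.1 hx with h1 | h1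
        · omega
        · exact hab h1
      have h1 : (i : Int) :: (ab ++ (f : Int) :: bb) = ((i : Int) :: ab) ++ (f : Int) :: bb := rfl
      rw [h1, ih (i+1) ((i : Int) :: ab) bb m (by omega) hab' hbb hm]
      rfl
    · by_cases hc : c = ')'
      · simp only [if_neg hp, if_pos hc]
        cases ab with
        | nil =>
          simp only [List.nil_append, List.length_nil]
          rw [if_pos ⟨hc, by simp⟩]
          simp only [List.tail_cons, List.headD_cons]
          rw [pvNoTouch f rs (i+1) bb _ hbb (by omega)]
          simp [PySem.Dict.get?_insert_self]
        | cons a ab' =>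
          simp only [List.cons_append, List.length_cons]
          rw [if_pos ⟨hc, by simp⟩]
          simp only [List.tail_cons, List.headD_cons]
          have hfa : (f : Int) ≠ a := fun he => hab (he ▸ List.mem_cons_self ..)
          rw [ih (i+1) ab' bb _ (by omega)
            (fun hx => hab (List.mem_cons_of_mem _ hx)) hbb
            (by simp [PySem.Dict.get?_insert, hfa, hm])]
          rw [if_neg (by omega)]
          simp
      · simp only [if_neg hp, if_neg hc]
        rw [if_neg (fun hx => hc hx.1)]
        exact ih (i+1) ab bb m (by omega) hab hbb hm

-- before the marker: the scan only pairs earlier parens, never touching key f,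
-- until it pushes f itself at index f
theorem pvPrefixPhase (f : Nat) :
    ∀ (rest : List Char) (i : Nat) (stack : List Int) (m : PySem.Dict Int Int),
      i ≤ f → (hlt : f - i < rest.length) → rest[f - i] = '(' →
      (f : Int) ∉ stack → PySem.Dict.get? m (f : Int) = none →
      PySem.Dict.get? (pvMatchLoop rest i stack m) (f : Int)
        = (pvClose (rest.drop (f - i + 1)) (f+1) 0).map (fun j => (j : Int)) := by
  intro rest
  induction rest with
  | nil =>
    intro i stack m _ hlt _ _ _
    simp at hlt
  | cons c rs ih =>
    intro i stack m hle hlt hget hmem hm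
    by_cases heq : i = f
    · subst heq
      have h0 : i - i = 0 := by omega
      have hc0 : c = '(' := by
        simp only [h0, List.getElem_cons_zero] at hget
        exact hget
      simp only [pvMatchLoop]
      rw [if_pos hc0, h0]
      have h1 : ((i : Int) :: stack) = [] ++ (i : Int) :: stack := rfl
      rw [h1]
      simpa using pvStackInv i rs (i+1) [] stack m (by omega) (by simp) hmem hm
    · have hi : i < f := by omega
      have hfi1 : f - i = (f - (i+1)) + 1 := by omega
      have hlt' : f - (i+1) < rs.length := by
        simp only [List.length_cons] at hlt; omega
      have hget' : rs[f - (i+1)]'hlt' = '(' := by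
        have := hget
        simp only [hfi1, List.getElem_cons_succ] at this
        exact this
      have hgoalDrop : (c :: rs).drop (f - i + 1) = rs.drop (f - (i+1) + 1) := by
        rw [show f - i + 1 = (f - (i+1) + 1) + 1 from by omega]; rfl
      simp only [pvMatchLoop]
      rw [hgoalDrop]
      by_cases hp : c = '('
      · rw [if_pos hp]
        have hni : (f : Int) ∉ ((i : Int) :: stack) := by
          intro hx
          rcases List.mem_cons.1 hx with h1 | h1
          · omega
          · exact hmem h1
        exact ih (i+1) _ m (by omega) hlt' hget' hni hm
      · rw [if_neg hp]
        cases stack with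
        | nil =>
          rw [if_neg (by simp)]
          exact ih (i+1) [] m (by omega) hlt' hget' (by simp) hm
        | cons t rest' =>
          by_cases hc : c = ')'
          · rw [if_pos ⟨hc, by simp⟩]
            simp only [List.tail_cons, List.headD_cons]
            have hft : (f : Int) ≠ t := fun he => hmem (he ▸ List.mem_cons_self ..)
            exact ih (i+1) rest' _ (by omega) hlt' hget'
              (fun hx => hmem (List.mem_cons_of_mem _ hx))
              (by simp [PySem.Dict.get?_insert, hft, hm])
          · rw [if_neg (fun hx => hc hx.1)]
            exact ih (i+1) (t :: rest') m (by omega) hlt' hget' hmem hm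

-- ===== VERDICT (by name: the statement is the Claim_ definition above) =====
theorem extract_outer_subquery_spec : Claim_equal_extract_outer_subquery := by
  intro s _
  unfold Spec_extract_outer_subquery extract_outer_subquery extract_outer_subquery_alt
  set cs := s.toList with hcs
  have hfind : PySem.Str.find s "(\nSELECT" = PySem.Chars.find cs "(\nSELECT".toList := by
    simp [hcs]
  simp only [hfind]
  by_cases hneg : PySem.Chars.find cs "(\nSELECT".toList = -1
  · rw [if_pos hneg]
    have hno : ¬ "(\nSELECT".toList <:+: cs := (PySem.Chars.find_eq_neg_one_iff _ _).1 hneg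
    refine pvNoMarker cs (fun j hj => ?_) 0 0
    have hin : PySem.Chars.isIn "(\nSELECT".toList cs = true :=
      (PySem.Chars.exists_prefix_drop_iff_isIn _ _).1 ⟨j, hj⟩
    exact hno ((PySem.Chars.isIn_iff_infix _ _).1 hin)
  · rw [if_neg hneg]
    have hpos : 0 ≤ PySem.Chars.find cs "(\nSELECT".toList := by
      have := PySem.Chars.neg_one_le_find cs "(\nSELECT".toList
      omega
    obtain ⟨hpre, hmin⟩ := PySem.Chars.find_spec (s := cs) (sub := "(\nSELECT".toList) hpos
    set f := (PySem.Chars.find cs "(\nSELECT".toList).toNat with hfdef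
    have hcast : ((f : Nat) : Int) = PySem.Chars.find cs "(\nSELECT".toList :=
      Int.toNat_of_nonneg hpos
    have hflen : f < cs.length := by
      have h1 := hpre.length_le
      have h2 : ("(\nSELECT".toList).length = 8 := rfl
      rw [h2, List.length_drop] at h1
      omega
    have hfc : cs[f] = '(' := by
      obtain ⟨t, ht⟩ := hpre
      have h2 : cs[f]? = some '(' := by
        have h3 : cs[f]? = (List.drop f cs)[0]? := by simp
        rw [h3, ← ht]
        rfl
      have h4 := List.getElem?_eq_getElem (l := cs) (i := f) hflen
      rw [h4] at h2
      exact Option.some.inj h2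
    have hA : pvALoop cs 0 [] true 0 = pvDLoop (cs.drop (f + 1)) (f : Int) (f+1) 0 := by
      have := pvPhase1 f cs 0 0 (by omega) (by simpa using hpre)
        (by intro j hj; simpa using hmin j (by omega))
      simpa using this
    have hB : PySem.Dict.get? (pvMatchLoop cs 0 [] PySem.Dict.empty) (f : Int)
        = (pvClose (cs.drop (f + 1)) (f+1) 0).map (fun j => (j : Int)) := by
      have := pvPrefixPhase f cs 0 [] PySem.Dict.empty (by omega) (by simpa using hflen)
        (by simpa using hfc) (by simp) (by simp)
      simpa using this
    have hD : pvDLoop (cs.drop (f + 1)) (f : Int) (f+1) 0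
        = (pvClose (cs.drop (f + 1)) (f+1) 0).map (fun j => [(f : Int), (j : Int)]) := by
      have h5 := pvDLoop_eq_close (f : Int) (cs.drop (f + 1)) (f+1) 0
      simpa using h5
    rw [hA, ← hcast, hB, hD]
    cases pvClose (cs.drop (f + 1)) (f+1) 0 <;> simp
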